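-- pv_equiv track=rewrite | github.com/Chudvan/Python_osnovy_programmirovaniya-Coursera- | Week6/Task6.py | defense
-- ===== SOURCE A (Python) =====
-- def defense(n, villages, m, shelters):
--     villagesTuple = []
--     sheltersTuple = []
--     for i in range(n):
--         villagesTuple.append((villages[i], i))
--     for i in range(m):
--         sheltersTuple.append((shelters[i], i + 1))
--     villagesTuple.sort()
--     sheltersTuple.sort()
--     previousShelterIndex = 0
--     curDistance = 1000000000
--     listSalvation = [0] * n
--     for village in villagesTuple:
--         for i in range(previousShelterIndex, m):
--             if abs(village[0] - sheltersTuple[i][0]) <= curDistance: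
--                 curDistance = abs(village[0] - sheltersTuple[i][0])
--                 if i == m - 1:
--                     listSalvation[village[1]] = sheltersTuple[i][1]
--                     previousShelterIndex = i
--                     curDistance = 1000000000
--             else:
--                 listSalvation[village[1]] = sheltersTuple[i - 1][1]
--                 previousShelterIndex = i - 1
--                 curDistance = 1000000000
--                 break
--     return listSalvation
-- ===== SOURCE B (Python) =====
-- def defense(n, villages, m, shelters):
--     # For each village, scan all shelters once and keep the best candidate:
--     # smaller distance wins; on equal distance the larger coordinate wins;
--     # scanning left to right with >= makes the larger original index win last.
--     result = []
--     for i in range(n):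
--         v = villages[i]
--         bestIdx = 0      # 1-based shelter index; 0 = no shelter seen
--         bestDist = 0
--         bestCoord = 0
--         for j in range(m):
--             s = shelters[j]
--             d = abs(v - s)
--             if bestIdx == 0 or d < bestDist or (d == bestDist and s >= bestCoord):
--                 bestIdx, bestDist, bestCoord = j + 1, d, s
--         result.append(bestIdx)
--     return result
-- ===== Notes on version B (the rewrite author's own statement) =====
-- stated objective: simpler
-- what changed: Replaces A's sort-both-lists-then-stateful-two-pointer by a direct selection: for each village one left-to-right scan of the shelters keeping the best candidate under the key (distance, larger coordinate, larger 1-based index); no sorting and no cursor state.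
-- outside the precondition, e.g. on defense(2, [5, 2000000005], 2, [0, 5]): A returns [2, 1], B returns [2, 2]; on defense(3, [0, 2000000000, 2000000001], 1, [0]): A raises IndexError, B returns [1, 1, 1]
import Mathlib
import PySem

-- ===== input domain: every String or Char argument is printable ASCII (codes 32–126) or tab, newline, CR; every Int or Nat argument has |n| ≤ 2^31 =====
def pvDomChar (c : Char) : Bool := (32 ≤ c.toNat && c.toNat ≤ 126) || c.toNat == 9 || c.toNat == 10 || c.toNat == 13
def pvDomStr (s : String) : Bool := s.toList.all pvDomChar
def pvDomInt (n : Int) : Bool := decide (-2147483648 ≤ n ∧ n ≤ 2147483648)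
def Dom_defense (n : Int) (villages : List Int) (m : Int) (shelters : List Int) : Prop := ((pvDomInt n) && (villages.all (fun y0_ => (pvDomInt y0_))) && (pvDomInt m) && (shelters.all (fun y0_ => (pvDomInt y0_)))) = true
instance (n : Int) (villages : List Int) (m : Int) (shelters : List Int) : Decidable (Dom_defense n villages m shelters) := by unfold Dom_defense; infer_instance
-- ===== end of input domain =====

-- B replaces A's sort-both-lists + stateful two-pointer by a direct per-village scan of the
-- shelters keeping the best candidate: objective 'simpler' (same result on Pre_'s domain).

-- ===== PORT A =====
-- inner for-loop of A: 'for i in range(previousShelterIndex, m)'; state (prev, curDistance, listSalvation)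
def innerA (vc vi : Int) (ss : List (Int × Int)) (m : Int) :
    List Int → Int × Int × List Int → Int × Int × List Int
  | [], st => st
  | i :: rest, st =>
    if |vc - (PySem.List.pyGetD ss i (0, 0)).1| ≤ st.2.1 then
      if i = m - 1 then
        innerA vc vi ss m rest
          (i, 1000000000, PySem.List.pySetD st.2.2 vi (PySem.List.pyGetD ss i (0, 0)).2)
      else
        innerA vc vi ss m rest (st.1, |vc - (PySem.List.pyGetD ss i (0, 0)).1|, st.2.2)
    else
      (i - 1, 1000000000, PySem.List.pySetD st.2.2 vi (PySem.List.pyGetD ss (i - 1) (0, 0)).2)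

def defense (n : Int) (villages : List Int) (m : Int) (shelters : List Int) : List Int :=
  let villagesTuple := (PySem.List.pyRange 0 n 1).map (fun i => (PySem.List.pyGetD villages i 0, i))
  let sheltersTuple := (PySem.List.pyRange 0 m 1).map (fun i => (PySem.List.pyGetD shelters i 0, i + 1))
  let vs := PySem.List.sorted2 villagesTuple Prod.fst Prod.snd false
  let ss := PySem.List.sorted2 sheltersTuple Prod.fst Prod.snd false
  let fin := vs.foldl
      (fun st village => innerA village.1 village.2 ss m (PySem.List.pyRange st.1 m 1) st)
      (0, 1000000000, List.replicate n.toNat 0)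
  fin.2.2

-- ===== PORT B =====
def bestShelter (v : Int) (m : Int) (shelters : List Int) : Int :=
  ((PySem.List.pyRange 0 m 1).foldl
    (fun (b : Int × Int × Int) j =>
      let s := PySem.List.pyGetD shelters j 0
      let d := |v - s|
      if b.1 = 0 ∨ d < b.2.1 ∨ (d = b.2.1 ∧ b.2.2 ≤ s) then (j + 1, d, s) else b)
    (0, 0, 0)).1

def defense_alt (n : Int) (villages : List Int) (m : Int) (shelters : List Int) : List Int :=
  (PySem.List.pyRange 0 n 1).map (fun i => bestShelter (PySem.List.pyGetD villages i 0) m shelters)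

-- ===== PRECONDITION & SPEC =====
-- Pre_ keeps the exercise's natural domain: the counts n, m do not exceed the list lengths (beyond
-- them A raises IndexError), and every used village-shelter distance is at most 10^9 — the
-- coordinate bound of the original Coursera task, which A's initial curDistance = 10^9 encodes.
-- Past a 10^9 gap A's cursor can step below index 0 of the sorted shelter list, where it either
-- raises IndexError or reads entries from the far end of the list; B could reproduce those values
-- only by carrying the same cursor state, so those inputs are excluded (examples under "cites").
def Pre_defense (n : Int) (villages : List Int) (m : Int) (shelters : List Int) : Prop :=
  n ≤ (villages.length : Int) ∧ m ≤ (shelters.length : Int) ∧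
  ∀ v ∈ villages.take n.toNat, ∀ s ∈ shelters.take m.toNat,
    v - s ≤ 1000000000 ∧ s - v ≤ 1000000000
instance (n : Int) (villages : List Int) (m : Int) (shelters : List Int) : Decidable (Pre_defense n villages m shelters) := by unfold Pre_defense; infer_instance

def pvWitness_defense : Int × List Int × Int × List Int := (2, [0, 10], 2, [3, 9])

def Spec_defense (n : Int) (villages : List Int) (m : Int) (shelters : List Int) (out : List Int) : Prop := out = defense_alt n villages m shelters
instance (n : Int) (villages : List Int) (m : Int) (shelters : List Int) (out : List Int) : Decidable (Spec_defense n villages m shelters out) := by unfold Spec_defense; infer_instance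

-- ===== CLAIM (what is proved, stated in full; the proofs are below) =====
def Claim_equal_defense : Prop := ∀ (n : Int) (villages : List Int) (m : Int) (shelters : List Int), Dom_defense n villages m shelters → Pre_defense n villages m shelters → Spec_defense n villages m shelters (defense n villages m shelters)

-- ===== LEMMAS AND PROOFS =====

def lexLe (p q : Int × Int) : Prop := p.1 < q.1 ∨ (p.1 = q.1 ∧ p.2 ≤ q.2)
def lexLt (p q : Int × Int) : Prop := p.1 < q.1 ∨ (p.1 = q.1 ∧ p.2 < q.2)
def keyLt (c : Int) (p q : Int × Int) : Prop :=
  |c - p.1| < |c - q.1| ∨ (|c - p.1| = |c - q.1| ∧ (q.1 < p.1 ∨ (q.1 = p.1 ∧ q.2 < p.2)))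
def Best (c : Int) (p : Int × Int) (L : List (Int × Int)) : Prop :=
  p ∈ L ∧ ∀ q ∈ L, q ≠ p → keyLt c p q
def bef (a b : Int × Int) : Bool := decide (a.1 < b.1) || (!decide (b.1 < a.1) && decide (a.2 < b.2))

lemma lexLe_of_not_lexLt (a b : Int × Int) (h : ¬ lexLt a b) : lexLe b a := by
  simp only [lexLt, lexLe] at *; omega

lemma lexLe_of_lexLt (a b : Int × Int) (h : lexLt a b) : lexLe a b := by
  simp only [lexLt, lexLe] at *; omega

lemma lexLe_trans (a b c : Int × Int) (h1 : lexLe a b) (h2 : lexLe b c) : lexLe a c := by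
  simp only [lexLe] at *; omega

lemma bef_iff (a b : Int × Int) : bef a b = true ↔ lexLt a b := by
  simp [bef, lexLt]; omega

lemma pairwise_insertBy (x : Int × Int) (ys : List (Int × Int)) (h : ys.Pairwise lexLe) :
    (PySem.List.insertBy bef x ys).Pairwise lexLe := by
  induction ys with
  | nil => simp [PySem.List.insertBy]
  | cons y ys ih =>
    rw [List.pairwise_cons] at h
    obtain ⟨hy, hys⟩ := h
    show (if bef x y then x :: y :: ys else y :: PySem.List.insertBy bef x ys).Pairwise lexLe
    by_cases hb : bef x y = true
    · rw [if_pos hb]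
      have hxy : lexLe x y := lexLe_of_lexLt _ _ ((bef_iff x y).mp hb)
      refine List.pairwise_cons.mpr ⟨?_, List.pairwise_cons.mpr ⟨hy, hys⟩⟩
      intro z hz
      rcases List.mem_cons.mp hz with rfl | hz
      · exact hxy
      · exact lexLe_trans _ _ _ hxy (hy z hz)
    · rw [if_neg hb]
      refine List.pairwise_cons.mpr ⟨?_, ih hys⟩
      intro z hz
      rcases (PySem.List.mem_insertBy bef x z ys).mp hz with rfl | hz
      · exact lexLe_of_not_lexLt _ _ (fun hl => hb ((bef_iff z y).mpr hl))
      · exact hy z hz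

lemma Best_perm (c : Int) (p : Int × Int) (L L' : List (Int × Int)) (hperm : L.Perm L')
    (h : Best c p L) : Best c p L' := by
  exact ⟨hperm.mem_iff.mp h.1, fun q hq => h.2 q (hperm.mem_iff.mpr hq)⟩


lemma pairwise_sorted2 (xs : List (Int × Int)) :
    (PySem.List.sorted2 xs Prod.fst Prod.snd false).Pairwise lexLe := by
  have aux : ∀ (l : List (Int × Int)) (acc : List (Int × Int)), acc.Pairwise lexLe →
      (l.foldl (fun acc x => PySem.List.insertBy bef x acc) acc).Pairwise lexLe := by
    intro l
    induction l with
    | nil => intro acc h; simpa using h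
    | cons a l ih => intro acc h; exact ih _ (pairwise_insertBy a acc h)
  have : PySem.List.sorted2 xs Prod.fst Prod.snd false
      = xs.foldl (fun acc x => PySem.List.insertBy bef x acc) [] := rfl
  rw [this]
  exact aux xs [] (List.Pairwise.nil)

lemma pairwise_lexLt_of_nodup (l : List (Int × Int)) (h : l.Pairwise lexLe)
    (hnd : (l.map Prod.snd).Nodup) : l.Pairwise lexLt := by
  have hnd' : l.Pairwise (fun a b => a.2 ≠ b.2) := (List.pairwise_map).mp hnd
  refine (List.pairwise_iff_getElem).mpr ?_
  rw [List.pairwise_iff_getElem] at h hnd'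
  intro i j hi hj hij
  have h1 := h i j hi hj hij
  have h2 := hnd' i j hi hj hij
  simp only [lexLe, lexLt] at *
  omega

def InvB (c : Int) (P : List (Int × Int)) (b : Int × Int × Int) : Prop :=
  (P = [] ∧ b = (0, 0, 0)) ∨
  (∃ p, p ∈ P ∧ b = (p.2, |c - p.1|, p.1) ∧ ∀ q ∈ P, q ≠ p → keyLt c p q)

def bstep (c : Int) (b : Int × Int × Int) (q : Int × Int) : Int × Int × Int :=
  if b.1 = 0 ∨ |c - q.1| < b.2.1 ∨ (|c - q.1| = b.2.1 ∧ b.2.2 ≤ q.1) then (q.2, |c - q.1|, q.1) else b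

lemma keyLt_trans' (c : Int) (p q r : Int × Int) (h1 : keyLt c p q) (h2 : keyLt c q r) : keyLt c p r := by
  simp only [keyLt, Int.abs_eq_natAbs] at *; omega

lemma invB_step (c : Int) (P : List (Int × Int)) (b : Int × Int × Int) (q : Int × Int)
    (hinv : InvB c P b) (hidx : ∀ p ∈ P, p.2 < q.2) (hpos : ∀ p ∈ P, 1 ≤ p.2) :
    InvB c (P ++ [q]) (bstep c b q) := by
  rcases hinv with ⟨rfl, rfl⟩ | ⟨p, hpP, rfl, hbest⟩
  · right
    refine ⟨q, by simp, by simp [bstep], ?_⟩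
    intro r hr hrq
    simp at hr
    exact absurd hr hrq
  · have hp2 : (1 : Int) ≤ p.2 := hpos p hpP
    have hq2 : p.2 < q.2 := hidx p hpP
    by_cases hC : ((p.2, |c - p.1|, p.1) : Int × Int × Int).1 = 0 ∨ |c - q.1| < |c - p.1| ∨
        (|c - q.1| = |c - p.1| ∧ p.1 ≤ q.1)
    · have hqp : keyLt c q p := by
        simp only [keyLt, Int.abs_eq_natAbs] at *
        rcases hC with h0 | h | ⟨he, hle⟩
        · omega
        · omega
        · omega
      right
      refine ⟨q, by simp, by simp [bstep, if_pos hC], ?_⟩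
      intro r hr hrq
      rcases List.mem_append.mp hr with hr | hr
      · by_cases hrp : r = p
        · exact hrp ▸ hqp
        · exact keyLt_trans' c q p r hqp (hbest r hr hrp)
      · simp at hr; exact absurd hr hrq
    · have hpq : keyLt c p q := by
        simp only [keyLt, Int.abs_eq_natAbs] at *
        push Not at hC
        omega
      right
      refine ⟨p, List.mem_append.mpr (Or.inl hpP), by simp [bstep, if_neg hC], ?_⟩
      intro r hr hrp
      rcases List.mem_append.mp hr with hr | hr
      · exact hbest r hr hrp
      · simp at hr; exact hr ▸ hpq

lemma invB_run (c : Int) :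
    ∀ (L P : List (Int × Int)) (b : Int × Int × Int),
      InvB c P b → (P ++ L).Pairwise (fun a b => a.2 < b.2) → (∀ p ∈ P ++ L, 1 ≤ p.2) →
      InvB c (P ++ L) (L.foldl (bstep c) b) := by
  intro L
  induction L with
  | nil => intro P b h _ _; simpa using h
  | cons q L ih =>
    intro P b hinv hpw hpos
    have hstep : InvB c (P ++ [q]) (bstep c b q) := by
      refine invB_step c P b q hinv ?_ ?_
      · intro p hp
        have := (List.pairwise_append.mp hpw).2.2 p hp q (by simp)
        exact this
      · intro p hp; exact hpos p (List.mem_append.mpr (Or.inl hp))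
    have h1 : (P ++ [q]) ++ L = P ++ q :: L := by simp
    have := ih (P ++ [q]) (bstep c b q) hstep (by rw [h1]; exact hpw) (by rw [h1]; exact hpos)
    rw [h1] at this
    simpa using this

lemma bestShelter_eq_fold (c m : Int) (shelters : List Int) :
    bestShelter c m shelters
      = (((PySem.List.pyRange 0 m 1).map (fun i => (PySem.List.pyGetD shelters i 0, i + 1))).foldl
          (bstep c) (0, 0, 0)).1 := by
  rw [List.foldl_map]; rfl

lemma bestShelter_best (c m : Int) (shelters : List Int) (hm : 0 < m) :
    ∃ p, Best c p ((PySem.List.pyRange 0 m 1).map (fun i => (PySem.List.pyGetD shelters i 0, i + 1)))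
      ∧ bestShelter c m shelters = p.2 := by
  set S := (PySem.List.pyRange 0 m 1).map (fun i => (PySem.List.pyGetD shelters i 0, i + 1)) with hS
  have hpw : S.Pairwise (fun a b => a.2 < b.2) := by
    rw [hS, List.pairwise_map]
    exact (PySem.List.pairwise_lt_pyRange_one 0 m).imp (by intro a b h; simpa using h)
  have hpos : ∀ p ∈ S, (1 : Int) ≤ p.2 := by
    rw [hS]
    intro p hp
    rcases List.mem_map.mp hp with ⟨i, hi, rfl⟩
    have := (PySem.List.mem_pyRange_one).mp hi
    simp; omega
  have hrun := invB_run c S [] (0, 0, 0) (Or.inl ⟨rfl, rfl⟩) (by simpa using hpw) (by simpa using hpos)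
  simp only [List.nil_append] at hrun
  rcases hrun with ⟨hSnil, _⟩ | ⟨p, hpS, hb, hbest⟩
  · exfalso
    have : S.length = (m - 0).toNat := by rw [hS]; simp [PySem.List.length_pyRange_one]
    rw [hSnil] at this; simp at this; omega
  · exact ⟨p, ⟨hpS, hbest⟩, by rw [bestShelter_eq_fold, hb]⟩

lemma lexLt_irrefl (p : Int × Int) : ¬ lexLt p p := by simp only [lexLt]; omega

lemma ne_of_getElem_lt (ss : List (Int × Int)) (hlex : ss.Pairwise lexLt)
    (i j : Nat) (hi : i < ss.length) (hj : j < ss.length) (hij : i ≠ j) : ss[i] ≠ ss[j] := by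
  intro he
  rcases Nat.lt_or_ge i j with h | h
  · exact lexLt_irrefl ss[j] (he ▸ (List.pairwise_iff_getElem.mp hlex i j hi hj h))
  · have hji : j < i := by omega
    exact lexLt_irrefl ss[j] (he ▸ (List.pairwise_iff_getElem.mp hlex j i hj hi hji))

lemma d_mono (c : Int) (ss : List (Int × Int)) (hlex : ss.Pairwise lexLt)
    (k : Nat) (hk : k < ss.length) (hbest : Best c ss[k] ss) :
    ∀ i, i + 1 ≤ k → ∀ (hi : i + 1 < ss.length), |c - ss[i+1].1| ≤ |c - (ss[i]'(by omega)).1| := by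
  intro i hik hi
  by_contra hgt
  have hii1 : lexLt (ss[i]'(by omega)) ss[i+1] :=
    List.pairwise_iff_getElem.mp hlex i (i+1) (by omega) hi (by omega)
  have hs1k : ss[i+1].1 ≤ ss[k].1 := by
    rcases Nat.lt_or_ge (i+1) k with h | h
    · have := List.pairwise_iff_getElem.mp hlex (i+1) k hi hk h
      simp only [lexLt] at this; omega
    · have : i + 1 = k := by omega
      subst this; omega
  have hki : keyLt c ss[k] (ss[i]'(by omega)) := by
    refine hbest.2 _ (List.getElem_mem _) ?_
    by_cases hik' : i = k
    · omega
    · exact ne_of_getElem_lt ss hlex i k (by omega) hk hik'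
  simp only [lexLt] at hii1
  simp only [keyLt, Int.abs_eq_natAbs] at *
  omega

lemma d_strict (c : Int) (ss : List (Int × Int)) (hlex : ss.Pairwise lexLt)
    (k : Nat) (hk : k < ss.length) (hbest : Best c ss[k] ss) :
    ∀ (h2 : k + 1 < ss.length), |c - ss[k].1| < |c - ss[k+1].1| := by
  intro h2
  have hkk1 : lexLt ss[k] ss[k+1] := List.pairwise_iff_getElem.mp hlex k (k+1) hk h2 (by omega)
  have hkey : keyLt c ss[k] ss[k+1] :=
    hbest.2 _ (List.getElem_mem _) (ne_of_getElem_lt ss hlex (k+1) k h2 hk (by omega))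
  simp only [lexLt] at hkk1
  simp only [keyLt, Int.abs_eq_natAbs] at *
  omega

lemma pos_mono (ss : List (Int × Int)) (hlex : ss.Pairwise lexLt) (c c' : Int) (hcc : c ≤ c')
    (i j : Nat) (hi : i < ss.length) (hj : j < ss.length)
    (hbi : Best c ss[i] ss) (hbj : Best c' ss[j] ss) : i ≤ j := by
  by_contra hgt
  have hji : j < i := by omega
  have hlt : lexLt ss[j] ss[i] := List.pairwise_iff_getElem.mp hlex j i hj hi hji
  have hne : ss[j] ≠ ss[i] := ne_of_getElem_lt ss hlex j i hj hi (by omega)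
  have h1 : keyLt c ss[i] ss[j] := hbi.2 _ (List.getElem_mem _) hne
  have h2 : keyLt c' ss[j] ss[i] := hbj.2 _ (List.getElem_mem _) (by exact fun h => hne h.symm)
  simp only [lexLt] at hlt
  simp only [keyLt, Int.abs_eq_natAbs] at h1 h2
  omega
lemma pyGetD_nat (ss : List (Int × Int)) (t : Nat) (ht : t < ss.length) :
    PySem.List.pyGetD ss ((t : Nat) : Int) (0, 0) = ss[t] := by
  rw [PySem.List.pyGetD_natCast]
  exact List.getD_eq_getElem ss (0, 0) ht

lemma inner_run (vc vi m : Int) (ss : List (Int × Int)) (hm : (ss.length : Int) = m)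
    (k : Nat) (hk : k < ss.length)
    (hP1 : ∀ i, i + 1 ≤ k → ∀ (hi : i + 1 < ss.length), |vc - ss[i+1].1| ≤ |vc - (ss[i]'(by omega)).1|)
    (hP2 : ∀ (h2 : k + 1 < ss.length), |vc - ss[k].1| < |vc - ss[k+1].1|) :
    ∀ (t : Nat) (ht : t ≤ k) (curD : Int), |vc - (ss[t]'(by omega)).1| ≤ curD →
      ∀ (prev : Int) (salv : List Int),
      innerA vc vi ss m (PySem.List.pyRange t m 1) (prev, curD, salv)
        = ((k : Int), 1000000000, PySem.List.pySetD salv vi ss[k].2) := by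
  have main : ∀ (fuel : Nat) (t : Nat) (hft : k - t = fuel) (ht : t ≤ k) (curD : Int)
      (hcd : |vc - (ss[t]'(by omega)).1| ≤ curD) (prev : Int) (salv : List Int),
      innerA vc vi ss m (PySem.List.pyRange t m 1) (prev, curD, salv)
        = ((k : Int), 1000000000, PySem.List.pySetD salv vi ss[k].2) := by
    intro fuel
    induction fuel with
    | zero =>
      intro t hft ht curD hcd prev salv
      have htk : t = k := by omega
      subst htk
      have htm : ((t : Nat) : Int) < m := by omega
      by_cases hlast : ((t : Nat) : Int) = m - 1
      · rw [PySem.List.pyRange_one_cons htm,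
          PySem.List.pyRange_one_eq_nil (by omega : m ≤ ((t : Nat) : Int) + 1)]
        simp only [innerA, pyGetD_nat ss t hk]
        rw [if_pos hcd, if_pos hlast]
      · have ht1 : t + 1 < ss.length := by omega
        rw [PySem.List.pyRange_one_cons htm]
        have h2 : (((t : Nat) : Int) + 1) = (((t + 1 : Nat)) : Int) := by push_cast; ring
        rw [h2, PySem.List.pyRange_one_cons (by omega : (((t + 1 : Nat)) : Int) < m)]
        simp only [innerA, pyGetD_nat ss t hk, pyGetD_nat ss (t + 1) ht1]
        rw [if_pos hcd, if_neg hlast]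
        have hc : ¬ (|vc - ss[t + 1].1| ≤ |vc - ss[t].1|) := by have := hP2 ht1; omega
        rw [if_neg hc]
        have h3 : (((t + 1 : Nat)) : Int) - 1 = ((t : Nat) : Int) := by push_cast; ring
        rw [h3, pyGetD_nat ss t hk]
    | succ f ih =>
      intro t hft ht curD hcd prev salv
      have htk : t < k := by omega
      have htm : ((t : Nat) : Int) < m := by omega
      rw [PySem.List.pyRange_one_cons htm]
      simp only [innerA, pyGetD_nat ss t (by omega)]
      rw [if_pos hcd, if_neg (by omega : ¬ ((t : Nat) : Int) = m - 1)]
      have h2 : (((t : Nat) : Int) + 1) = (((t + 1 : Nat)) : Int) := by push_cast; ring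
      rw [h2]
      exact ih (t + 1) (by omega) (by omega) _ (hP1 t (by omega) (by omega)) prev salv
  intro t ht curD hcd prev salv
  exact main (k - t) t rfl ht curD hcd prev salv

lemma outer_run (m : Int) (shelters : List Int) (ss : List (Int × Int))
    (hperm : ss.Perm ((PySem.List.pyRange 0 m 1).map (fun i => (PySem.List.pyGetD shelters i 0, i + 1))))
    (hm : (ss.length : Int) = m) (hm0 : 0 < m)
    (hlex : ss.Pairwise lexLt) :
    ∀ (vl : List (Int × Int)) (prev : Int) (salv : List Int),
      vl.Pairwise (fun a b => a.1 ≤ b.1) →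
      (∀ p ∈ vl, ∀ q ∈ ss, |p.1 - q.1| ≤ 1000000000) →
      0 ≤ prev →
      (∀ p ∈ vl, ∀ (kp : Nat) (hkp : kp < ss.length), Best p.1 ss[kp] ss → prev ≤ (kp : Int)) →
      ∃ prev', vl.foldl
          (fun st village => innerA village.1 village.2 ss m (PySem.List.pyRange st.1 m 1) st)
          (prev, 1000000000, salv)
        = (prev', 1000000000,
           vl.foldl (fun a p => PySem.List.pySetD a p.2 (bestShelter p.1 m shelters)) salv) := by
  intro vl
  induction vl with
  | nil => intro prev salv _ _ _ _; exact ⟨prev, rfl⟩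
  | cons v vl ih =>
    intro prev salv hpw hwin hprev0 hprevle
    obtain ⟨hv, hvl⟩ := List.pairwise_cons.mp hpw
    obtain ⟨p, hbestS, hval⟩ := bestShelter_best v.1 m shelters hm0
    have hbest : Best v.1 p ss := Best_perm _ p _ _ hperm.symm hbestS
    obtain ⟨k, hk, hkp⟩ := List.getElem_of_mem hbest.1
    have hbk : Best v.1 ss[k] ss := by rw [hkp]; exact hbest
    have hP1 := d_mono v.1 ss hlex k hk hbk
    have hP2 := d_strict v.1 ss hlex k hk hbk
    have hprevk : prev ≤ (k : Int) := hprevle v (List.mem_cons_self) k hk hbk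
    have htk : prev.toNat ≤ k := by omega
    have hnat : ((prev.toNat : Nat) : Int) = prev := by omega
    have hstart : |v.1 - (ss[prev.toNat]'(by omega)).1| ≤ 1000000000 :=
      hwin v (List.mem_cons_self) _ (List.getElem_mem _)
    have hinner := inner_run v.1 v.2 m ss hm k hk hP1 hP2 prev.toNat htk 1000000000 hstart prev salv
    rw [hnat] at hinner
    have hstep : innerA v.1 v.2 ss m
          (PySem.List.pyRange ((prev, (1000000000 : Int), salv) : Int × Int × List Int).1 m 1)
          ((prev, 1000000000, salv) : Int × Int × List Int)
        = ((k : Int), 1000000000, PySem.List.pySetD salv v.2 (bestShelter v.1 m shelters)) := by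
      simpa [hval, hkp] using hinner
    obtain ⟨prev', heq⟩ := ih (k : Int)
      (PySem.List.pySetD salv v.2 (bestShelter v.1 m shelters))
      hvl
      (fun p hp q hq => hwin p (List.mem_cons_of_mem _ hp) q hq)
      (by positivity)
      (by
        intro p' hp' kp hkp hbp'
        have := pos_mono ss hlex v.1 p'.1 (hv p' hp') k kp hk hkp hbk hbp'
        omega)
    refine ⟨prev', ?_⟩
    rw [List.foldl_cons, hstep, heq, List.foldl_cons]


lemma foldset_length (F : Int → Int) (L : List (Int × Int)) :
    ∀ (acc : List Int), (∀ p ∈ L, 0 ≤ p.2) →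
      (L.foldl (fun a p => PySem.List.pySetD a p.2 (F p.1)) acc).length = acc.length := by
  induction L with
  | nil => intro acc _; rfl
  | cons q L ih =>
    intro acc h0
    rw [List.foldl_cons, ih _ (fun p hp => h0 p (List.mem_cons_of_mem _ hp))]
    rw [PySem.List.pySetD_of_nonneg _ _ (h0 q List.mem_cons_self)]
    exact List.length_set ..

lemma foldset_get_not (F : Int → Int) (L : List (Int × Int)) (j : Nat) :
    ∀ (acc : List Int), (∀ p ∈ L, 0 ≤ p.2) → (∀ p ∈ L, p.2 ≠ (j : Int)) →
      (L.foldl (fun a p => PySem.List.pySetD a p.2 (F p.1)) acc)[j]? = acc[j]? := by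
  induction L with
  | nil => intro acc _ _; rfl
  | cons q L ih =>
    intro acc h0 hnot
    rw [List.foldl_cons, ih _ (fun p hp => h0 p (List.mem_cons_of_mem _ hp))
      (fun p hp => hnot p (List.mem_cons_of_mem _ hp))]
    rw [PySem.List.pySetD_of_nonneg _ _ (h0 q List.mem_cons_self)]
    have hq0 := h0 q List.mem_cons_self
    have hqj := hnot q List.mem_cons_self
    rw [List.getElem?_set_ne (by omega)]

lemma foldset_get_mem (F : Int → Int) (L : List (Int × Int)) (p : Int × Int) :
    ∀ (acc : List Int), (∀ p ∈ L, 0 ≤ p.2) → (L.map Prod.snd).Nodup → p ∈ L →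
      p.2.toNat < acc.length →
      (L.foldl (fun a q => PySem.List.pySetD a q.2 (F q.1)) acc)[p.2.toNat]? = some (F p.1) := by
  induction L with
  | nil => intro acc _ _ hp _; exact absurd hp (List.not_mem_nil)
  | cons q L ih =>
    intro acc h0 hnd hp hlen
    have hnd' := hnd
    rw [List.map_cons, List.nodup_cons] at hnd'
    rcases List.mem_cons.mp hp with rfl | hp'
    · rw [List.foldl_cons]
      have hnot : ∀ r ∈ L, r.2 ≠ ((p.2.toNat : Nat) : Int) := by
        intro r hr
        have : p.2 ∉ L.map Prod.snd := hnd'.1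
        have hr2 : r.2 ∈ L.map Prod.snd := List.mem_map_of_mem hr
        intro he
        have hp0 := h0 p List.mem_cons_self
        have : r.2 = p.2 := by omega
        exact hnd'.1 (this ▸ hr2)
      rw [foldset_get_not F L p.2.toNat _ (fun r hr => h0 r (List.mem_cons_of_mem _ hr)) hnot]
      rw [PySem.List.pySetD_of_nonneg _ _ (h0 p List.mem_cons_self)]
      rw [List.getElem?_set_self (by omega)]
    · rw [List.foldl_cons]
      refine ih _ (fun r hr => h0 r (List.mem_cons_of_mem _ hr)) hnd'.2 hp' ?_
      rw [PySem.List.pySetD_of_nonneg _ _ (h0 q List.mem_cons_self), List.length_set]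
      exact hlen

lemma setfold_eq (F : Int → Int) (n : Int) (g : Int → Int) (vs : List (Int × Int))
    (hperm : vs.Perm ((PySem.List.pyRange 0 n 1).map (fun i => (g i, i)))) :
    vs.foldl (fun a p => PySem.List.pySetD a p.2 (F p.1)) (List.replicate n.toNat 0)
      = (PySem.List.pyRange 0 n 1).map (fun i => F (g i)) := by
  have h0 : ∀ p ∈ vs, 0 ≤ p.2 := by
    intro p hp
    rcases List.mem_map.mp (hperm.mem_iff.mp hp) with ⟨i, hi, rfl⟩
    have := PySem.List.mem_pyRange_one.mp hi
    simpa using this.1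
  have hnd : (vs.map Prod.snd).Nodup := by
    have h1 : (vs.map Prod.snd).Perm
        (((PySem.List.pyRange 0 n 1).map (fun i => (g i, i))).map Prod.snd) := hperm.map _
    have h2 : ((PySem.List.pyRange 0 n 1).map (fun i => (g i, i))).map Prod.snd
        = PySem.List.pyRange 0 n 1 := by
      rw [List.map_map]; exact List.map_id'' (fun x => rfl) _
    rw [h2] at h1
    exact h1.nodup_iff.mpr (PySem.List.nodup_pyRange_one 0 n)
  have hlen : ∀ (j : Nat), j < n.toNat → ((g (j : Int), (j : Int)) ∈ vs) := by
    intro j hj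
    refine hperm.mem_iff.mpr (List.mem_map.mpr ⟨(j : Int), ?_, rfl⟩)
    exact PySem.List.mem_pyRange_one.mpr (by omega)
  refine List.ext_getElem? ?_
  intro j
  have hLlen : (vs.foldl (fun a p => PySem.List.pySetD a p.2 (F p.1))
      (List.replicate n.toNat 0)).length = n.toNat := by
    rw [foldset_length F vs _ h0, List.length_replicate]
  have hRlen : ((PySem.List.pyRange 0 n 1).map (fun i => F (g i))).length = n.toNat := by
    rw [List.length_map, PySem.List.length_pyRange_one]; simp
  by_cases hj : j < n.toNat
  · have hL := foldset_get_mem F vs ((g (j : Int), (j : Int))) (List.replicate n.toNat 0)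
      h0 hnd (hlen j hj) (by simpa using hj)
    simp only [Int.toNat_natCast] at hL
    rw [hL]
    rw [List.getElem?_map]
    rw [List.getElem?_eq_getElem (by rw [PySem.List.length_pyRange_one]; simpa using hj)]
    simp [PySem.List.getElem_pyRange_one]
  · rw [List.getElem?_eq_none (by omega), List.getElem?_eq_none (by omega)]

lemma bestShelter_nonpos (c m : Int) (shelters : List Int) (hm : m ≤ 0) :
    bestShelter c m shelters = 0 := by
  rw [bestShelter, PySem.List.pyRange_one_eq_nil (by omega)]
  rfl

lemma mem_take_of_getD (xs : List Int) (bound i : Int) (h0 : 0 ≤ i) (hib : i < bound)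
    (hbl : bound ≤ (xs.length : Int)) :
    PySem.List.pyGetD xs i 0 ∈ xs.take bound.toNat := by
  rw [PySem.List.pyGetD_eq_getElem xs 0 h0 (by omega)]
  have hlt : i.toNat < (xs.take bound.toNat).length := by
    rw [List.length_take]; omega
  have : (xs.take bound.toNat)[i.toNat] = xs[i.toNat]'(by omega) := List.getElem_take
  exact this ▸ List.getElem_mem hlt

-- ===== VERDICT (by name: the statement is the Claim_ definition above) =====
theorem defense_spec : Claim_equal_defense := by
  unfold Claim_equal_defense Spec_defense
  intro n villages m shelters hdom hpre
  obtain ⟨hnl, hml, hwin⟩ := hpre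
  simp only [defense, defense_alt]
  by_cases hm0 : m ≤ 0
  · -- no shelters are considered: A never assigns, B always returns 0
    rw [PySem.List.pyRange_one_eq_nil (show m ≤ 0 by omega)]
    have hss : PySem.List.sorted2 (List.map (fun i => (PySem.List.pyGetD shelters i 0, i + 1)) [])
        Prod.fst Prod.snd false = [] := rfl
    rw [List.map_nil] at hss ⊢
    rw [hss]
    have hfold : ∀ (vl : List (Int × Int)) (st : Int × Int × List Int), m ≤ st.1 →
        vl.foldl (fun st village =>
          innerA village.1 village.2 [] m (PySem.List.pyRange st.1 m 1) st) st = st := by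
      intro vl
      induction vl with
      | nil => intro st _; rfl
      | cons v vl ih =>
        intro st hst
        rw [List.foldl_cons, PySem.List.pyRange_one_eq_nil hst]
        exact ih st hst
    rw [hfold _ _ (by omega : m ≤ ((0 : Int), (1000000000 : Int),
      List.replicate n.toNat (0 : Int)).1)]
    rw [List.map_congr_left (fun i _ => bestShelter_nonpos (PySem.List.pyGetD villages i 0) m shelters hm0)]
    rw [List.map_const', PySem.List.length_pyRange_one]
    simp
  · have hm0' : 0 < m := by omega
    have hpermS := PySem.List.sorted2_perm
      ((PySem.List.pyRange 0 m 1).map (fun i => (PySem.List.pyGetD shelters i 0, i + 1)))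
      Prod.fst Prod.snd false
    have hpermV := PySem.List.sorted2_perm
      ((PySem.List.pyRange 0 n 1).map (fun i => (PySem.List.pyGetD villages i 0, i)))
      Prod.fst Prod.snd false
    set S := (PySem.List.pyRange 0 m 1).map (fun i => (PySem.List.pyGetD shelters i 0, i + 1)) with hSdef
    set vt := (PySem.List.pyRange 0 n 1).map (fun i => (PySem.List.pyGetD villages i 0, i)) with hvtdef
    set ss := PySem.List.sorted2 S Prod.fst Prod.snd false with hssdef
    set vs := PySem.List.sorted2 vt Prod.fst Prod.snd false with hvsdef
    have hSnd : (S.map Prod.snd).Nodup := by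
      rw [hSdef, List.map_map]
      have : ((fun p : Int × Int => p.2) ∘ fun i => (PySem.List.pyGetD shelters i 0, i + 1))
          = fun i => i + 1 := rfl
      rw [this]
      exact (PySem.List.nodup_pyRange_one 0 m).map (fun a b h => by omega)
    have hssnd : (ss.map Prod.snd).Nodup := ((hpermS.map Prod.snd).nodup_iff).mpr hSnd
    have hlex : ss.Pairwise lexLt := pairwise_lexLt_of_nodup ss (pairwise_sorted2 S) hssnd
    have hmlen : (ss.length : Int) = m := by
      rw [hpermS.length_eq, hSdef, List.length_map, PySem.List.length_pyRange_one]
      omega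
    have hwinvs : ∀ p ∈ vs, ∀ q ∈ ss, |p.1 - q.1| ≤ 1000000000 := by
      intro p hp q hq
      obtain ⟨i, hi, rfl⟩ := List.mem_map.mp (hpermV.mem_iff.mp hp)
      obtain ⟨j, hj, rfl⟩ := List.mem_map.mp (hpermS.mem_iff.mp hq)
      have hi' := PySem.List.mem_pyRange_one.mp hi
      have hj' := PySem.List.mem_pyRange_one.mp hj
      have hv := mem_take_of_getD villages n i hi'.1 hi'.2 hnl
      have hs := mem_take_of_getD shelters m j hj'.1 hj'.2 hml
      have := hwin _ hv _ hs
      simp only [Int.abs_eq_natAbs]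
      omega
    obtain ⟨prev', heq⟩ := outer_run m shelters ss hpermS hmlen hm0' hlex vs 0
      (List.replicate n.toNat 0)
      ((pairwise_sorted2 vt).imp (by intro a b h; rcases h with h | ⟨h1, h2⟩ <;> omega))
      hwinvs le_rfl
      (by intro p hp kp hkp _; positivity)
    rw [heq]
    exact setfold_eq (fun c => bestShelter c m shelters) n
      (fun i => PySem.List.pyGetD villages i 0) vs hpermV
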